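-- pv_equiv track=rewrite | github.com/jebreimo/SublimeCppMacros | cppimplmaker.py | cleanPrefix
-- ===== SOURCE A (Python) =====
-- def appendIfNonEmpty(l, s):
--     if s:
--         l.append(s)
--
-- def isIdentifier(c):
--     return c.isalnum() or c == "_"
--
-- def removeWord(s, w):
--     start = s.find(w)
--     while start != -1:
--         end = start + len(w)
--         front = "" if start == 0 else s[start - 1]
--         back = "" if end == len(s) else s[end]
--         if not isIdentifier(front) and not isIdentifier(back):
--             # Not part of a longer word
--             if front.isspace():
--                 start -= 1
--             elif back.isspace():
--                 end += 1
--             s = s[:start] + s[end:]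
--         else:
--             start = end
--         start = s.find(w, start)
--     return s
--
-- def cleanPrefix(lines, isMember):
--     result = []
--     for line in lines:
--         line = removeWord(line, "virtual")
--         line = removeWord(line, "explicit")
--         if isMember:
--             line = removeWord(line, "static")
--         line = line.strip()
--         appendIfNonEmpty(result, line)
--     return result
-- ===== SOURCE B (Python) =====
-- def _isIdent(c):
--     return c.isalnum() or c == "_"
--
-- def _stripWord(s, w):
--     out = []
--     rest = s
--     while rest:
--         if rest.startswith(w):
--             tail = rest[len(w):]
--             front = out[-1] if out else ""
--             back = tail[0] if tail else ""
--             if not _isIdent(front) and not _isIdent(back):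
--                 if front.isspace():
--                     out.pop()
--                     rest = tail
--                 elif back.isspace():
--                     rest = tail[1:]
--                 else:
--                     rest = tail
--             else:
--                 out.extend(w)
--                 rest = tail
--         else:
--             out.append(rest[0])
--             rest = rest[1:]
--     return "".join(out)
--
-- def cleanPrefix(lines, isMember):
--     words = ["virtual", "explicit", "static"] if isMember else ["virtual", "explicit"]
--     result = []
--     for line in lines:
--         for w in words:
--             line = _stripWord(line, w)
--         line = line.strip()
--         if line:
--             result.append(line)
--     return result
-- ===== Notes on version B (the rewrite author's own statement) =====
-- stated objective: alternative
-- what changed: removeWord's find/slice-and-restart loop over a mutating string is replaced by a single left-to-right scan that keeps an output stack of retained characters (popping it to eat a preceding whitespace), and the fixed keyword sequence becomes a fold over a keyword list.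
import Mathlib
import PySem

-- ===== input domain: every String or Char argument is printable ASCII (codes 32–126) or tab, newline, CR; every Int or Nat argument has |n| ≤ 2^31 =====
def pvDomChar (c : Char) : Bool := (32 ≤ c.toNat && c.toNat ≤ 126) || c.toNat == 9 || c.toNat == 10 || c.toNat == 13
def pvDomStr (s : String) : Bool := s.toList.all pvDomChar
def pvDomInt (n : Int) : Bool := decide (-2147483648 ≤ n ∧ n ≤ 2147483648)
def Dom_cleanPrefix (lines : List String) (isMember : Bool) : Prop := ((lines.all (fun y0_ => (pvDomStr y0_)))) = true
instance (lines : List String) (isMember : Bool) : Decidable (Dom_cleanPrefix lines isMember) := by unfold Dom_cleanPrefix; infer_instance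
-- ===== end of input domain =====

-- B replaces A's find/slice-and-restart loop by a single left-to-right scan with an output
-- stack (alternative decomposition, same observable results; return values only, A mutates
-- neither argument).

-- ===== PORT A =====
-- isIdentifier(c): `c` is a 0- or 1-char string (`front`/`back` may be ""), modelled as List Char
def pvIsIdentifier (cs : List Char) : Bool :=
  PySem.Chars.strIsalnum cs || cs == ['_']

-- the `while start != -1` loop of removeWord; fuel only makes the loop total
def removeWordGo (w : List Char) (fuel : Nat) (s : List Char) (start : Int) : List Char :=
  match fuel with
  | 0 => s
  | fuel + 1 =>
    if start = -1 then s
    else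
      let e : Int := start + (w.length : Int)
      let front : List Char :=
        if start = 0 then [] else ((PySem.List.pyGet? s (start - 1)).map (fun c => [c])).getD []
      let back : List Char :=
        if e = (s.length : Int) then [] else ((PySem.List.pyGet? s e).map (fun c => [c])).getD []
      if !pvIsIdentifier front && !pvIsIdentifier back then
        if PySem.Chars.strIsspace front then
          let start' := start - 1
          let s' := PySem.List.slice s none (some start') ++ PySem.List.slice s (some e) none
          removeWordGo w fuel s' (PySem.Chars.findFrom s' w start')
        else if PySem.Chars.strIsspace back then
          let e' := e + 1
          let s' := PySem.List.slice s none (some start) ++ PySem.List.slice s (some e') none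
          removeWordGo w fuel s' (PySem.Chars.findFrom s' w start)
        else
          let s' := PySem.List.slice s none (some start) ++ PySem.List.slice s (some e) none
          removeWordGo w fuel s' (PySem.Chars.findFrom s' w start)
      else
        removeWordGo w fuel s (PySem.Chars.findFrom s w e)

def removeWord (s w : List Char) : List Char :=
  removeWordGo w (s.length + 1) s (PySem.Chars.find s w)

def appendIfNonEmpty (l : List String) (s : List Char) : List String :=
  if s ≠ [] then l ++ [String.ofList s] else l

def cleanPrefix (lines : List String) (isMember : Bool) : List String :=
  lines.foldl (fun result line =>
    let l1 := removeWord line.toList "virtual".toList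
    let l2 := removeWord l1 "explicit".toList
    let l3 := if isMember then removeWord l2 "static".toList else l2
    appendIfNonEmpty result (PySem.Chars.strip l3)) []

-- ===== PORT B =====
-- the `while rest` scan of _stripWord: `out` is the kept-character stack; fuel only makes it total
def stripWordGo (w : List Char) (fuel : Nat) (out rest : List Char) : List Char :=
  match fuel with
  | 0 => out ++ rest
  | fuel + 1 =>
    match rest with
    | [] => out
    | c :: rs =>
      if PySem.Chars.startswith (c :: rs) w then
        let tail := (c :: rs).drop w.length
        let front : List Char := out.getLast?.elim [] (fun x => [x])
        let back : List Char := tail.head?.elim [] (fun x => [x])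
        if !pvIsIdentifier front && !pvIsIdentifier back then
          if PySem.Chars.strIsspace front then stripWordGo w fuel out.dropLast tail
          else if PySem.Chars.strIsspace back then stripWordGo w fuel out tail.tail
          else stripWordGo w fuel out tail
        else stripWordGo w fuel (out ++ w) tail
      else stripWordGo w fuel (out ++ [c]) rs

def stripWord (s w : List Char) : List Char :=
  stripWordGo w (s.length + 1) [] s

def cleanPrefix_alt (lines : List String) (isMember : Bool) : List String :=
  let words := if isMember then ["virtual".toList, "explicit".toList, "static".toList]
               else ["virtual".toList, "explicit".toList]
  lines.foldl (fun result line =>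
    let l := PySem.Chars.strip (words.foldl (fun cur w => stripWord cur w) line.toList)
    if l = [] then result else result ++ [String.ofList l]) []

-- ===== PRECONDITION & SPEC =====
def Spec_cleanPrefix (lines : List String) (isMember : Bool) (out : List String) : Prop := out = cleanPrefix_alt lines isMember
instance (lines : List String) (isMember : Bool) (out : List String) : Decidable (Spec_cleanPrefix lines isMember out) := by unfold Spec_cleanPrefix; infer_instance

-- ===== CLAIM (what is proved, stated in full; the proofs are below) =====
def Claim_equal_cleanPrefix : Prop := ∀ (lines : List String) (isMember : Bool), Dom_cleanPrefix lines isMember → Spec_cleanPrefix lines isMember (cleanPrefix lines isMember)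

-- ===== LEMMAS AND PROOFS =====

theorem stripWordGo_copy (w : List Char) (r1 : List Char) :
    ∀ (out r2 : List Char) (fuel : Nat),
    (∀ i < r1.length, ¬ w <+: (r1 ++ r2).drop i) →
    stripWordGo w (fuel + r1.length) out (r1 ++ r2) = stripWordGo w fuel (out ++ r1) r2 := by
  induction r1 with
  | nil => intro out r2 fuel h; simp
  | cons c r1' ih =>
    intro out r2 fuel h
    have h0 : ¬ w <+: (c :: (r1' ++ r2)) := by simpa using h 0 (by simp)
    have hsw : PySem.Chars.startswith (c :: (r1' ++ r2)) w = false := by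
      rw [Bool.eq_false_iff]
      intro hc
      exact h0 ((PySem.Chars.startswith_iff _ _).mp hc)
    have hfuel : fuel + (c :: r1').length = (fuel + r1'.length) + 1 := by simp; omega
    rw [List.cons_append, hfuel, stripWordGo]
    simp only [hsw, Bool.false_eq_true, if_false]
    rw [ih (out ++ [c]) r2 fuel (fun i hi => by simpa using h (i+1) (by simpa using hi))]
    simp

-- no occurrence of w in rest: A stops, B copies rest
theorem main_noocc (w : List Char) (rest done : List Char) (fuelA fuelB : Nat)
    (hA : rest.length < fuelA) (hB : rest.length < fuelB)
    (hfind : PySem.Chars.find rest w = -1) :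
    removeWordGo w fuelA (done ++ rest) (PySem.Chars.findFrom (done ++ rest) w (done.length : Int)) =
      stripWordGo w fuelB done rest := by
  obtain ⟨fA, rfl⟩ : ∃ fA, fuelA = fA + 1 := ⟨fuelA - 1, by omega⟩
  have hff : PySem.Chars.findFrom (done ++ rest) w (done.length : Int) = -1 := by
    rw [PySem.Chars.findFrom_natCast _ _ done.length (by simp)]
    rw [List.drop_left, hfind]
    simp
  rw [hff, removeWordGo, if_pos rfl]
  have hno : ∀ i < rest.length, ¬ w <+: (rest ++ ([] : List Char)).drop i := by
    intro i hi hpre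
    have hinf : w <:+: rest := by
      rw [← PySem.Chars.isIn_iff_infix, ← PySem.Chars.exists_prefix_drop_iff_isIn]
      exact ⟨i, by simpa using hpre⟩
    rw [PySem.Chars.find_eq_neg_one_iff] at hfind
    exact hfind hinf
  have hcopy := stripWordGo_copy w rest done [] (fuelB - rest.length) hno
  rw [show fuelB - rest.length + rest.length = fuelB by omega] at hcopy
  rw [show rest ++ ([] : List Char) = rest by simp] at hcopy
  rw [hcopy]
  obtain ⟨fB, hfB⟩ : ∃ fB, fuelB - rest.length = fB + 1 := ⟨fuelB - rest.length - 1, by omega⟩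
  rw [hfB, stripWordGo]

theorem stripWordGo_step (w : List Char) (hw : w ≠ []) (fuel : Nat) (out tail : List Char) :
    stripWordGo w (fuel + 1) out (w ++ tail) =
      (if !pvIsIdentifier (out.getLast?.elim [] (fun x => [x])) &&
          !pvIsIdentifier (tail.head?.elim [] (fun x => [x])) then
        if PySem.Chars.strIsspace (out.getLast?.elim [] (fun x => [x])) then
          stripWordGo w fuel out.dropLast tail
        else if PySem.Chars.strIsspace (tail.head?.elim [] (fun x => [x])) then
          stripWordGo w fuel out tail.tail
        else stripWordGo w fuel out tail
      else stripWordGo w fuel (out ++ w) tail) := by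
  obtain ⟨c, t, rfl⟩ : ∃ c t, w = c :: t := by
    cases w with
    | nil => exact absurd rfl hw
    | cons c t => exact ⟨c, t, rfl⟩
  have hsw : PySem.Chars.startswith (c :: (t ++ tail)) (c :: t) = true := by
    rw [PySem.Chars.startswith_iff, ← List.cons_append]
    exact ⟨tail, rfl⟩
  rw [List.cons_append, stripWordGo]
  simp only [hsw, if_true]
  rw [show List.drop (c :: t).length (c :: (t ++ tail)) = tail by
    rw [← List.cons_append, List.drop_left]]

theorem removeWordGo_eq_scan (w : List Char) (hw : w ≠ []) :
    ∀ (N : Nat) (rest : List Char), rest.length ≤ N →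
    ∀ (done : List Char) (fuelA fuelB : Nat),
    rest.length < fuelA → rest.length < fuelB →
    removeWordGo w fuelA (done ++ rest) (PySem.Chars.findFrom (done ++ rest) w (done.length : Int)) =
      stripWordGo w fuelB done rest := by
  intro N
  induction N with
  | zero =>
    intro rest hle done fuelA fuelB hA hB
    have hrest : rest = [] := List.length_eq_zero_iff.mp (by omega)
    subst hrest
    exact main_noocc w [] done fuelA fuelB hA hB (by
      rw [PySem.Chars.find_eq_neg_one_iff, List.infix_nil]; exact hw)
  | succ N ih =>
    intro rest hle done fuelA fuelB hA hB
    rcases eq_or_ne (PySem.Chars.find rest w) (-1) with hfind | hfind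
    · exact main_noocc w rest done fuelA fuelB hA hB hfind
    · have hf0 : 0 ≤ PySem.Chars.find rest w := by
        have := PySem.Chars.neg_one_le_find rest w; omega
      obtain ⟨hpre, hmin⟩ := PySem.Chars.find_spec (s := rest) (sub := w) hf0
      set j : Nat := (PySem.Chars.find rest w).toNat with hj
      have hfj : PySem.Chars.find rest w = (j : Int) := (Int.toNat_of_nonneg hf0).symm
      obtain ⟨tail, htail⟩ := hpre
      have hjle : j ≤ rest.length := by
        have := PySem.Chars.find_le_length rest w; omega
      have hrest : rest = rest.take j ++ (w ++ tail) := by rw [htail, List.take_append_drop]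
      have hplen : (rest.take j).length = j := by simp [hjle]
      have hwpos : 1 ≤ w.length := List.length_pos_iff.mpr hw
      have hlen : rest.length = j + (w.length + tail.length) := by
        conv_lhs => rw [hrest]
        simp [hplen]
      have hcond : ∀ i < (rest.take j).length, ¬ w <+: ((rest.take j) ++ (w ++ tail)).drop i := by
        intro i hi
        rw [← hrest]
        exact hmin i (by omega)
      have hcopy := stripWordGo_copy w (rest.take j) done (w ++ tail) (fuelB - j) hcond
      rw [show fuelB - j + (rest.take j).length = fuelB by omega] at hcopy
      rw [← hrest] at hcopy
      set done' := done ++ rest.take j with hd'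
      have hd'len : done'.length = done.length + j := by simp [hd', hplen]
      have hff : PySem.Chars.findFrom (done ++ rest) w (done.length : Int) = (done'.length : Int) := by
        rw [PySem.Chars.findFrom_natCast _ _ done.length (by simp), List.drop_left, hfj]
        rw [if_neg (by omega)]
        omega
      obtain ⟨fA, rfl⟩ : ∃ fA, fuelA = fA + 1 := ⟨fuelA - 1, by omega⟩
      have hs : done ++ rest = done' ++ (w ++ tail) := by
        rw [hd', List.append_assoc, ← hrest]
      rw [hff, removeWordGo, if_neg (by omega)]
      simp only []
      -- front/back of A equal B's
      have hfrontA : (if (done'.length : Int) = 0 then []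
          else ((PySem.List.pyGet? (done ++ rest) ((done'.length : Int) - 1)).map (fun c => [c])).getD []) =
          done'.getLast?.elim [] (fun x => [x]) := by
        by_cases hde : done' = []
        · simp [hde]
        · have h1 : 1 ≤ done'.length := List.length_pos_iff.mpr hde
          rw [if_neg (by omega)]
          rw [show ((done'.length : Int) - 1) = ((done'.length - 1 : Nat) : Int) by omega]
          rw [PySem.List.pyGet?_natCast, hs, List.getElem?_append_left (by omega),
            ← List.getLast?_eq_getElem?]
          cases hgl : done'.getLast? with
          | none => exact absurd (List.getLast?_eq_none_iff.mp hgl) hde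
          | some x => simp
      have hbackA : (if (done'.length : Int) + (w.length : Int) = ((done ++ rest).length : Int) then []
          else ((PySem.List.pyGet? (done ++ rest) ((done'.length : Int) + (w.length : Int))).map (fun c => [c])).getD []) =
          tail.head?.elim [] (fun x => [x]) := by
        have hslen : (done ++ rest).length = done'.length + (w.length + tail.length) := by
          rw [hs]; simp
        cases tail with
        | nil =>
          rw [if_pos (by rw [hs]; simp [List.length_append]; try omega)]
          simp
        | cons t0 ts =>
          rw [if_neg (by rw [hs]; simp [List.length_append]; try omega)]
          rw [show ((done'.length : Int) + (w.length : Int)) = (((done' ++ w).length : Nat) : Int) by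
            simp [List.length_append]; try omega]
          rw [PySem.List.pyGet?_natCast, hs, ← List.append_assoc,
            List.getElem?_append_right le_rfl]
          simp
      rw [hfrontA, hbackA, hcopy]
      obtain ⟨fB, hfB⟩ : ∃ fB, fuelB - j = fB + 1 := ⟨fuelB - j - 1, by omega⟩
      rw [hfB, stripWordGo_step w hw fB done' tail]
      -- slice values
      have hslice1 : PySem.List.slice (done ++ rest) none (some (done'.length : Int)) = done' := by
        rw [PySem.List.slice_to_natCast, hs, List.take_left]
      have hslice2 : PySem.List.slice (done ++ rest) (some ((done'.length : Int) + (w.length : Int))) none = tail := by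
        rw [show ((done'.length : Int) + (w.length : Int)) = (((done' ++ w).length : Nat) : Int) by
          simp [List.length_append]; try omega]
        rw [PySem.List.slice_from_natCast, hs, ← List.append_assoc, List.drop_left]
      by_cases h1 : (!pvIsIdentifier (done'.getLast?.elim [] (fun x => [x])) &&
          !pvIsIdentifier (tail.head?.elim [] (fun x => [x]))) = true
      · rw [if_pos h1, if_pos h1]
        by_cases h2 : PySem.Chars.strIsspace (done'.getLast?.elim [] (fun x => [x])) = true
        · rw [if_pos h2, if_pos h2]
          have hne : done' ≠ [] := by
            intro hd0
            rw [hd0] at h2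
            exact absurd h2 (by decide)
          have h1d : 1 ≤ done'.length := List.length_pos_iff.mpr hne
          have hslice3 : PySem.List.slice (done ++ rest) none (some ((done'.length : Int) - 1)) = done'.dropLast := by
            rw [show ((done'.length : Int) - 1) = ((done'.length - 1 : Nat) : Int) by omega]
            rw [PySem.List.slice_to_natCast, hs, List.take_append_of_le_length (by omega),
              ← List.dropLast_eq_take]
          rw [hslice3, hslice2]
          rw [show ((done'.length : Int) - 1) = ((done'.dropLast.length : Nat) : Int) by
            simp [List.length_dropLast]; omega]
          exact ih tail (by omega) done'.dropLast fA fB (by omega) (by omega)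
        · rw [if_neg h2, if_neg h2]
          by_cases h3 : PySem.Chars.strIsspace (tail.head?.elim [] (fun x => [x])) = true
          · rw [if_pos h3, if_pos h3]
            cases tail with
            | nil => exact absurd h3 (by decide)
            | cons t0 ts =>
              have hslice4 : PySem.List.slice (done ++ rest) (some ((done'.length : Int) + (w.length : Int) + 1)) none = ts := by
                rw [show ((done'.length : Int) + (w.length : Int) + 1) = ((((done' ++ w).length + 1) : Nat) : Int) by
                  simp [List.length_append]; try omega]
                rw [PySem.List.slice_from_natCast, hs, ← List.append_assoc,
                  List.drop_length_add_append, List.drop_one]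
                rfl
              rw [hslice1, hslice4]
              have := ih ts (by simp at hlen; omega) done' fA fB (by simp at hlen; omega)
                (by simp at hlen; omega)
              simpa using this
          · rw [if_neg h3, if_neg h3]
            rw [hslice1, hslice2]
            exact ih tail (by omega) done' fA fB (by omega) (by omega)
      · rw [if_neg h1, if_neg h1]
        rw [show ((done'.length : Int) + (w.length : Int)) = (((done' ++ w).length : Nat) : Int) by
          simp [List.length_append]; try omega]
        rw [show done ++ rest = (done' ++ w) ++ tail by rw [hs]; simp [hd', List.append_assoc]]
        exact ih tail (by omega) (done' ++ w) fA fB (by omega) (by omega)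

theorem removeWord_eq_stripWord (s w : List Char) (hw : w ≠ []) :
    removeWord s w = stripWord s w := by
  have h := removeWordGo_eq_scan w hw s.length s le_rfl [] (s.length + 1) (s.length + 1)
    (by omega) (by omega)
  simpa [removeWord, stripWord, PySem.Chars.findFrom_zero] using h

-- ===== VERDICT (by name: the statement is the Claim_ definition above) =====
theorem cleanPrefix_spec : Claim_equal_cleanPrefix := by
  intro lines isMember _
  unfold Spec_cleanPrefix cleanPrefix cleanPrefix_alt appendIfNonEmpty
  cases isMember <;>
  · simp only [List.foldl, if_true, if_false, Bool.false_eq_true, ne_eq, ite_not]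
    congr 1
    funext result line
    rw [removeWord_eq_stripWord _ _ (by decide), removeWord_eq_stripWord _ _ (by decide)]
    try rw [removeWord_eq_stripWord _ _ (by decide)]
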